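-- pv_equiv track=rewrite | github.com/Mapoet/autoGit-MCP | src/git_tool/git_gitwork_commands.py | _group_commits_by_date
-- ===== SOURCE A (Python) =====
-- from collections import defaultdict
-- from typing import Any, Dict, List, Optional, Tuple
--
-- def _group_commits_by_date(commits: List[Dict[str, Any]]) -> Dict[str, List[Dict[str, Any]]]:
--     """Group commits by date."""
--     groups: Dict[str, List[Dict[str, Any]]] = defaultdict(list)
--     for c in commits:
--         date_part = c["date"].split(" ")[0]
--         groups[date_part].append(c)
--     for k in groups:
--         groups[k].sort(key=lambda x: x["date"])
--     return dict(sorted(groups.items(), key=lambda x: x[0]))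
-- ===== SOURCE B (Python) =====
-- def _group_commits_by_date(commits):
--     """Group commits by date: collect the distinct day keys, sort them, then
--     build each group directly by filtering and sorting the commits for that day."""
--     keys = sorted({c["date"].split(" ")[0] for c in commits})
--     return {
--         k: sorted((c for c in commits if c["date"].split(" ")[0] == k),
--                   key=lambda x: x["date"])
--         for k in keys
--     }
-- ===== Notes on version B (the rewrite author's own statement) =====
-- stated objective: simpler
-- what changed: A builds a defaultdict in one pass, then sorts each group in place and finally re-sorts the dict's items by key; B never builds a mutable grouping dict: it first computes the sorted list of distinct day keys and then constructs each group directly as a filtered-and-sorted selection of the commits.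
import Mathlib
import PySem

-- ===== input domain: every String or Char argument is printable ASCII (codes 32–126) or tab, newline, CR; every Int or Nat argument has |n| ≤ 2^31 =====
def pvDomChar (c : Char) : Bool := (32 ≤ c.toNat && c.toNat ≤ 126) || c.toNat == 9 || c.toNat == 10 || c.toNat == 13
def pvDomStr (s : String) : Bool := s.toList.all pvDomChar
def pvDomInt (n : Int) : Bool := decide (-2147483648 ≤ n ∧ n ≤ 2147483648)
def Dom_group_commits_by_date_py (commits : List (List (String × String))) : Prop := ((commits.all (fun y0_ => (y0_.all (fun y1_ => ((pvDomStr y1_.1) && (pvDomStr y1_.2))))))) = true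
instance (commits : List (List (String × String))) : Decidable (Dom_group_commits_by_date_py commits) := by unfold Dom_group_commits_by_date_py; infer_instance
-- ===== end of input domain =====

-- B drops A's mutable grouping dict: it sorts the distinct day keys once and builds each group
-- directly as a filtered-and-sorted selection of the commits (simpler; same return value).


-- ===== PORT A =====
-- c["date"] (total form; Pre_ guarantees the key is present)
def pvDate (c : List (String × String)) : String := ((PySem.Dict.ofList c).get? "date").getD ""
-- c["date"].split(" ")[0] (split with a non-empty separator never returns [], so [0] is total)
def pvPart (c : List (String × String)) : String := ((PySem.Str.split? (pvDate c) " ").getD []).headD ""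

def group_commits_by_date_py (commits : List (List (String × String))) : List (String × List (List (String × String))) :=
  -- groups = defaultdict(list); for c in commits: groups[date_part].append(c)
  let groups := commits.foldl (fun g c => PySem.Dict.modify g (pvPart c) [] (fun v => v ++ [c])) PySem.Dict.empty
  -- for k in groups: groups[k].sort(key=lambda x: x["date"])
  let groups2 := groups.items.map (fun p => (p.1, PySem.List.sorted p.2 pvDate false))
  -- dict(sorted(groups.items(), key=lambda x: x[0]))
  PySem.List.sorted groups2 (fun p => p.1) false

-- ===== PORT B =====
def group_commits_by_date_py_alt (commits : List (List (String × String))) : List (String × List (List (String × String))) :=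
  -- keys = sorted({c["date"].split(" ")[0] for c in commits})
  let keys := PySem.List.sorted (PySem.Set.ofList (commits.map pvPart)) (fun k => k) false
  -- {k: sorted((c for c in commits if part(c) == k), key=date) for k in keys}
  keys.map (fun k => (k, PySem.List.sorted (commits.filter (fun c => pvPart c == k)) pvDate false))

-- ===== PRECONDITION & SPEC =====
-- Pre_ excludes exactly the commits without a "date" key, on which A raises KeyError.
def Pre_group_commits_by_date_py (commits : List (List (String × String))) : Prop :=
  (commits.all (fun c => (PySem.Dict.ofList c).contains "date")) = true
instance (commits : List (List (String × String))) : Decidable (Pre_group_commits_by_date_py commits) := by unfold Pre_group_commits_by_date_py; infer_instance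
def pvWitness_group_commits_by_date_py : (List (List (String × String))) :=
  [[("date", "2024-01-02 10:00"), ("msg", "b")], [("date", "2024-01-01 09:00")], [("date", "2024-01-02 08:00")]]

def Spec_group_commits_by_date_py (commits : List (List (String × String))) (out : List (String × List (List (String × String)))) : Prop := out = group_commits_by_date_py_alt commits
instance (commits : List (List (String × String))) (out : List (String × List (List (String × String)))) : Decidable (Spec_group_commits_by_date_py commits out) := by unfold Spec_group_commits_by_date_py; infer_instance

-- ===== CLAIM (what is proved, stated in full; the proofs are below) =====
def Claim_equal_group_commits_by_date_py : Prop := ∀ (commits : List (List (String × String))), Dom_group_commits_by_date_py commits → Pre_group_commits_by_date_py commits → Spec_group_commits_by_date_py commits (group_commits_by_date_py commits)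

-- ===== LEMMAS AND PROOFS =====

-- A's grouping fold
def pvG (l : List (List (String × String))) : PySem.Dict String (List (List (String × String))) :=
  l.foldl (fun g c => PySem.Dict.modify g (pvPart c) [] (fun v => v ++ [c])) PySem.Dict.empty

theorem items_pvG (l : List (List (String × String))) :
    (pvG l).items = (PySem.Set.ofList (l.map pvPart)).map
      (fun k => (k, l.filter (fun c => pvPart c == k))) := by
  induction l using List.reverseRecOn with
  | nil => rfl
  | append_singleton l c ih =>
    have hfold : pvG (l ++ [c])
        = (pvG l).insert (pvPart c) ((pvG l).getD (pvPart c) [] ++ [c]) := by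
      simp [pvG, List.foldl_append, PySem.Dict.modify]
    have hkeys : (pvG l).keys = PySem.Set.ofList (l.map pvPart) := by
      simp only [PySem.Dict.keys, ih, List.map_map]
      simp [Function.comp_def]
    rw [hfold]
    simp only [List.map_append, List.map_cons, List.map_nil]
    rw [PySem.Set.ofList_append_singleton]
    by_cases hm : pvPart c ∈ PySem.Set.ofList (l.map pvPart)
    · have hcont : (pvG l).contains (pvPart c) = true := by
        rw [PySem.Dict.contains_iff_mem_keys, hkeys]; exact hm
      have hmemitems : (pvPart c, l.filter (fun x => pvPart x == pvPart c)) ∈ (pvG l).items := by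
        rw [ih]; exact List.mem_map.mpr ⟨pvPart c, hm, rfl⟩
      have hget : (pvG l).getD (pvPart c) [] = l.filter (fun x => pvPart x == pvPart c) := by
        rw [PySem.Dict.getD_eq_get?_getD,
          PySem.Dict.get?_of_mem_items _ hmemitems (hkeys ▸ PySem.Set.nodup_ofList _)]
        rfl
      rw [PySem.Dict.items_insert_of_contains _ _ hcont, ih, List.map_map,
        PySem.Set.add_eq_ite, if_pos hm]
      refine List.map_congr_left ?_
      intro k hk
      by_cases hkc : k = pvPart c
      · subst hkc
        simp [hget, List.filter_append]
      · have h1 : (k == pvPart c) = false := beq_eq_false_iff_ne.mpr hkc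
        have h2 : (pvPart c == k) = false := beq_eq_false_iff_ne.mpr (Ne.symm hkc)
        simp [h2, hkc, List.filter_append]
    · have hcont : (pvG l).contains (pvPart c) = false := by
        rw [← Bool.not_eq_true, PySem.Dict.contains_iff_mem_keys, hkeys]; exact hm
      have hnof : ∀ x ∈ l, ¬ (pvPart x == pvPart c) = true := by
        intro x hx hb
        exact hm ((PySem.Set.mem_ofList _ _).mpr (List.mem_map.mpr ⟨x, hx, eq_of_beq hb⟩))
      have hget : (pvG l).getD (pvPart c) [] = [] :=
        PySem.Dict.getD_of_not_contains _ _ hcont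
      rw [PySem.Dict.items_insert_of_not_contains _ _ hcont, ih,
        PySem.Set.add_eq_ite, if_neg hm, List.map_append, hget]
      congr 1
      · refine List.map_congr_left ?_
        intro k hk
        have hkc : (pvPart c == k) = false := by
          refine beq_eq_false_iff_ne.mpr ?_
          intro h; exact hm (h ▸ hk)
        simp [hkc, List.filter_append]
      · simp only [List.map_cons, List.map_nil, List.filter_append]
        have : l.filter (fun x => pvPart x == pvPart c) = [] :=
          List.filter_eq_nil_iff.mpr hnof
        simp [this]

theorem A_eq_alt (l : List (List (String × String))) :
    group_commits_by_date_py l = group_commits_by_date_py_alt l := by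
  have h0 : group_commits_by_date_py l
      = PySem.List.sorted ((pvG l).items.map
          (fun p => (p.1, PySem.List.sorted p.2 pvDate false))) (fun p => p.1) false := rfl
  rw [h0, items_pvG, List.map_map]
  show _ = (PySem.List.sorted (PySem.Set.ofList (l.map pvPart)) (fun k => k) false).map
      (fun k => (k, PySem.List.sorted (l.filter (fun c => pvPart c == k)) pvDate false))
  refine PySem.List.sorted_eq_of_perm_of_pairwise_lt _ _ _ ?_ ?_
  · exact ((PySem.List.sorted_perm (PySem.Set.ofList (l.map pvPart)) (fun k => k) false).map _)
  · refine List.pairwise_map.mpr ?_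
    have := PySem.List.sorted_ofList_pairwise_lt (l.map pvPart)
    exact this.imp (fun h => h)

-- ===== VERDICT (by name: the statement is the Claim_ definition above) =====
theorem group_commits_by_date_py_spec : Claim_equal_group_commits_by_date_py := by
  intro commits _ _
  unfold Spec_group_commits_by_date_py
  exact A_eq_alt commits
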